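-- pv_equiv track=rewrite | github.com/ttoro-lee/Algorithms | 백준/Silver/1105. 팔/팔.py | solution
-- ===== SOURCE A (Python) =====
-- def solution(L, R):
--
--     if len(L) != len(R):
--         return 0
--
--     else:
--         if L == R:
--             return L.count('8')
--
--         else:
--             for i in range(len(L)):
--                 if L[i] != R[i]:
--                     break
--         return L[:i].count('8')
-- ===== SOURCE B (Python) =====
-- def _common_prefix(L, R):
--     # divide and conquer: prefix of the halves, glued when the left half fully matches
--     n = len(L)
--     if n == 0:
--         return ''
--     if n == 1:
--         return L if L == R else ''
--     m = n // 2
--     p = _common_prefix(L[:m], R[:m])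
--     if len(p) < m:
--         return p
--     return p + _common_prefix(L[m:], R[m:])
--
-- def solution(L, R):
--     if len(L) != len(R):
--         return 0
--     return _common_prefix(L, R).count('8')
-- ===== Notes on version B (the rewrite author's own statement) =====
-- stated objective: alternative
-- what changed: Replaces A's three-way branching (length guard, equal-strings count, index break-loop then recount of a slice) with a divide-and-conquer helper that computes the common prefix string by halving, then a single count of '8' in that prefix; the equal-strings special case and the loop-index bookkeeping disappear.
import Mathlib
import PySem

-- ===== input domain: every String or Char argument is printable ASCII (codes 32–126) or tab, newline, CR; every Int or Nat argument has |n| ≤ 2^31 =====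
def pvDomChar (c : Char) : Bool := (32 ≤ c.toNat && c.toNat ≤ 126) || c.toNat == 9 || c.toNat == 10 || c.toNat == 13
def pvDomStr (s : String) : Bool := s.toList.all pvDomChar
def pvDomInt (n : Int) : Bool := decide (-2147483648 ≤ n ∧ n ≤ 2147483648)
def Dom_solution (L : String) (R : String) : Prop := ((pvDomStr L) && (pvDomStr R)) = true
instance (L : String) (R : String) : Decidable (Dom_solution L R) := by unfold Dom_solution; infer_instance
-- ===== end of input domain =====

-- B replaces A's three-way branching (equal-strings count / index break-loop then recount of a
-- slice) by a divide-and-conquer computation of the common prefix string, counted once;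
-- objective: alternative decomposition.

-- ===== PORT A =====
-- 'for i in range(len(L)): if L[i] != R[i]: break' — returns the loop variable's final value.
-- The '_ - 1' arm is the loop running to the end without break (i ends at len-1); in A it is
-- reached only in the unreachable case L = R (that branch returned earlier).
def solutionBreakIdx : List Char → List Char → Nat → Nat
  | a :: as, b :: bs, i => if a ≠ b then i else solutionBreakIdx as bs (i + 1)
  | _, _, i => i - 1

def solution (L : String) (R : String) : Int :=
  if L.toList.length ≠ R.toList.length then 0
  else if L = R then (L.toList.count '8' : Int)
  else ((L.toList.take (solutionBreakIdx L.toList R.toList 0)).count '8' : Int)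

-- ===== PORT B =====
-- divide and conquer: common prefix of the halves, glued when the left half fully matches.
-- The fuel argument only makes the recursion structural: fuel = a.length always suffices
-- (each recursive call is on a strictly shorter list).
def solutionCPFuel : Nat → List Char → List Char → List Char
  | 0, _, _ => []
  | fuel + 1, a, b =>
    if a.length = 0 then []
    else if a.length = 1 then (if a = b then a else [])
    else
      let m := a.length / 2
      let p := solutionCPFuel fuel (a.take m) (b.take m)
      if p.length < m then p
      else p ++ solutionCPFuel fuel (a.drop m) (b.drop m)

def solutionCP (a : List Char) (b : List Char) : List Char :=
  solutionCPFuel a.length a b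

def solution_alt (L : String) (R : String) : Int :=
  if L.toList.length ≠ R.toList.length then 0
  else ((solutionCP L.toList R.toList).count '8' : Int)

-- ===== PRECONDITION & SPEC =====
def Spec_solution (L : String) (R : String) (out : Int) : Prop := out = solution_alt L R
instance (L : String) (R : String) (out : Int) : Decidable (Spec_solution L R out) := by unfold Spec_solution; infer_instance

-- ===== CLAIM (what is proved, stated in full; the proofs are below) =====
def Claim_equal_solution : Prop := ∀ (L : String) (R : String), Dom_solution L R → Spec_solution L R (solution L R)

-- ===== LEMMAS AND PROOFS =====

-- proof-side specification of the common prefix (structural cons recursion)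
def cpS : List Char → List Char → List Char
  | x :: as, y :: bs => if x = y then x :: cpS as bs else []
  | _, _ => []

theorem cpS_self (a : List Char) : cpS a a = a := by
  induction a with
  | nil => simp [cpS]
  | cons x as ih => simp [cpS, ih]

theorem cpS_prefix (a b : List Char) : cpS a b <+: a := by
  induction a generalizing b with
  | nil => simp [cpS]
  | cons x as ih =>
    cases b with
    | nil => simp [cpS]
    | cons y bs =>
      by_cases h : x = y
      · simpa [cpS, h, List.cons_prefix_cons] using ih bs
      · simp [cpS, h]

theorem cpS_append (a b c d : List Char) (hlen : a.length = b.length) :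
    cpS (a ++ c) (b ++ d) = if cpS a b = a then a ++ cpS c d else cpS a b := by
  induction a generalizing b with
  | nil =>
    cases b with
    | nil => simp [cpS]
    | cons y bs => simp at hlen
  | cons x as ih =>
    cases b with
    | nil => simp at hlen
    | cons y bs =>
      have hlen' : as.length = bs.length := by simpa using hlen
      by_cases h : x = y
      · subst h
        by_cases hf : cpS as bs = as
        · simp [cpS, ih bs hlen', hf]
        · simp [cpS, ih bs hlen', hf]
      · simp only [List.cons_append, cpS, if_neg h]
        rw [if_neg (by simp)]

theorem solutionCPFuel_eq_cpS : ∀ (fuel : Nat) (a b : List Char), a.length ≤ fuel →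
    a.length = b.length → solutionCPFuel fuel a b = cpS a b := by
  intro fuel
  induction fuel with
  | zero =>
    intro a b hf hlen
    have ha : a = [] := List.length_eq_zero_iff.mp (by omega)
    have hb : b = [] := List.length_eq_zero_iff.mp (by omega)
    simp [ha, hb, solutionCPFuel, cpS]
  | succ fuel ih =>
    intro a b hf hlen
    rw [solutionCPFuel]
    by_cases h0 : a.length = 0
    · rw [if_pos h0]
      have ha : a = [] := List.length_eq_zero_iff.mp h0
      have hb : b = [] := List.length_eq_zero_iff.mp (by omega)
      simp [ha, hb, cpS]
    · rw [if_neg h0]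
      by_cases h1 : a.length = 1
      · rw [if_pos h1]
        obtain ⟨x, ha⟩ := List.length_eq_one_iff.mp h1
        obtain ⟨y, hb⟩ := List.length_eq_one_iff.mp (show b.length = 1 by omega)
        subst ha; subst hb
        by_cases hxy : x = y <;> simp [cpS, hxy]
      · rw [if_neg h1]
        show (if (solutionCPFuel fuel (a.take (a.length / 2)) (b.take (a.length / 2))).length < a.length / 2
              then solutionCPFuel fuel (a.take (a.length / 2)) (b.take (a.length / 2))
              else solutionCPFuel fuel (a.take (a.length / 2)) (b.take (a.length / 2))
                   ++ solutionCPFuel fuel (a.drop (a.length / 2)) (b.drop (a.length / 2))) = cpS a b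
        have h2 : 2 ≤ a.length := by omega
        have hm1 : 1 ≤ a.length / 2 := by omega
        have hmlt : a.length / 2 < a.length := by omega
        have hta : (a.take (a.length / 2)).length = a.length / 2 := by
          simp [List.length_take]; omega
        have htb : (b.take (a.length / 2)).length = a.length / 2 := by
          simp [List.length_take]; omega
        have hp := ih (a.take (a.length / 2)) (b.take (a.length / 2)) (by omega) (by omega)
        have hq := ih (a.drop (a.length / 2)) (b.drop (a.length / 2))
          (by simp [List.length_drop]; omega) (by simp [List.length_drop]; omega)
        rw [hp, hq]
        have hsplit : cpS a b
            = if cpS (a.take (a.length / 2)) (b.take (a.length / 2)) = a.take (a.length / 2)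
              then a.take (a.length / 2) ++ cpS (a.drop (a.length / 2)) (b.drop (a.length / 2))
              else cpS (a.take (a.length / 2)) (b.take (a.length / 2)) := by
          conv_lhs => rw [← List.take_append_drop (a.length / 2) a,
            ← List.take_append_drop (a.length / 2) b]
          exact cpS_append _ _ _ _ (by omega)
        rw [hsplit]
        have hpref := cpS_prefix (a.take (a.length / 2)) (b.take (a.length / 2))
        by_cases hfull : cpS (a.take (a.length / 2)) (b.take (a.length / 2)) = a.take (a.length / 2)
        · rw [if_pos hfull, if_neg (by rw [hfull, hta]; omega), hfull]
        · have hle : (cpS (a.take (a.length / 2)) (b.take (a.length / 2))).length ≤ a.length / 2 := by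
            have := hpref.length_le; rw [hta] at this; exact this
          have hlt : (cpS (a.take (a.length / 2)) (b.take (a.length / 2))).length < a.length / 2 := by
            rcases lt_or_eq_of_le hle with h | h
            · exact h
            · exact absurd (hpref.eq_of_length (by omega)) hfull
          rw [if_neg hfull, if_pos hlt]

theorem solutionCP_eq_cpS (a b : List Char) (hlen : a.length = b.length) :
    solutionCP a b = cpS a b :=
  solutionCPFuel_eq_cpS a.length a b le_rfl hlen

theorem take_breakIdx_shift (a b : List Char) (i : Nat)
    (hlen : a.length = b.length) (hne : a ≠ b) :
    solutionBreakIdx a b i = solutionBreakIdx a b 0 + i := by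
  induction a generalizing b i with
  | nil => cases b <;> simp_all
  | cons x as ih =>
    cases b with
    | nil => simp at hlen
    | cons y bs =>
      by_cases h : x = y
      · have hne' : as ≠ bs := by intro e; exact hne (by rw [h, e])
        have hlen' : as.length = bs.length := by simpa using hlen
        subst h
        simp only [solutionBreakIdx, if_neg (show ¬(x ≠ x) from fun hc => hc rfl)]
        rw [ih bs (i + 1) hlen' hne', ih bs (0 + 1) hlen' hne']
        omega
      · simp [solutionBreakIdx, h]

theorem take_breakIdx_eq (a b : List Char) (hlen : a.length = b.length) (hne : a ≠ b) :
    a.take (solutionBreakIdx a b 0) = cpS a b := by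
  induction a generalizing b with
  | nil => cases b <;> simp_all
  | cons x as ih =>
    cases b with
    | nil => simp at hlen
    | cons y bs =>
      by_cases h : x = y
      · have hne' : as ≠ bs := by intro e; exact hne (by rw [h, e])
        have hlen' : as.length = bs.length := by simpa using hlen
        subst h
        simp only [solutionBreakIdx, cpS,
          if_neg (show ¬(x ≠ x) from fun hc => hc rfl), if_true]
        rw [take_breakIdx_shift as bs 1 hlen' hne', List.take_succ_cons, ih bs hlen' hne']
      · simp [solutionBreakIdx, cpS, h]

-- ===== VERDICT (by name: the statement is the Claim_ definition above) =====
theorem solution_spec : Claim_equal_solution := by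
  intro L R _
  unfold Spec_solution solution solution_alt
  by_cases hlen : L.toList.length ≠ R.toList.length
  · rw [if_pos hlen, if_pos hlen]
  · rw [if_neg hlen, if_neg hlen]
    have hlen' : L.toList.length = R.toList.length := by omega
    rw [solutionCP_eq_cpS L.toList R.toList hlen']
    by_cases heq : L = R
    · rw [if_pos heq, heq, cpS_self]
    · rw [if_neg heq]
      have hne : L.toList ≠ R.toList := fun e => heq (by
        have := congrArg String.ofList e
        simpa using this)
      rw [take_breakIdx_eq L.toList R.toList hlen' hne]
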